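-- pv_equiv track=rewrite | github.com/sarahekaireb/CSE237D_Rock_Climbing_Coach | src/utils/report_utils.py | get_last_double_handhold
-- ===== SOURCE A (Python) =====
-- def joint_in_hold(joint, hold):
--     # joint is (x, y)
--     # hold is [(x_min, y_min), (x_max, y_max)]
--     jx, jy = joint
--     h_xmin, h_ymin = hold[0]
--     h_xmax, h_ymax = hold[1]
--
--     if jx <= h_xmax and jx >= h_xmin and jy <= h_ymax and jy >= h_ymin:
--         return True
--     else:
--         return False
--
-- def get_last_double_handhold(holds, positions):
--     last_idx = -1
--     zipped = list(zip(positions['left_hand'], positions['right_hand']))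
--     for i in range(len(zipped)):
--         lh, rh = zipped[i]
--         for j in range(len(holds)):
--             if joint_in_hold(lh, holds[j]) and joint_in_hold(rh, holds[j]):
--                 last_idx = j
--     return last_idx
-- ===== SOURCE B (Python) =====
-- def joint_in_hold(joint, hold):
--     # joint is (x, y)
--     # hold is [(x_min, y_min), (x_max, y_max)]
--     jx, jy = joint
--     h_xmin, h_ymin = hold[0]
--     h_xmax, h_ymax = hold[1]
--     return jx <= h_xmax and jx >= h_xmin and jy <= h_ymax and jy >= h_ymin
--
--
-- def _scan_frame(holds, lh, rh):
--     # largest hold index containing both hands in this frame, or None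
--     for j in range(len(holds) - 1, -1, -1):
--         if joint_in_hold(lh, holds[j]) and joint_in_hold(rh, holds[j]):
--             return j
--     return None
--
--
-- def get_last_double_handhold(holds, positions):
--     # scan frames from the last one backwards and return at the first match:
--     # this is exactly "last matching frame, largest matching hold index"
--     for lh, rh in reversed(list(zip(positions['left_hand'], positions['right_hand']))):
--         j = _scan_frame(holds, lh, rh)
--         if j is not None:
--             return j
--     return -1
-- ===== Notes on version B (the rewrite author's own statement) =====
-- stated objective: alternative
-- what changed: Replaces the full forward double scan with an overwritten accumulator by a backward scan (frames from the end, hold indices from the top) that returns at the first match, so no accumulator is kept and the scan can stop early.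
import Mathlib
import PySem

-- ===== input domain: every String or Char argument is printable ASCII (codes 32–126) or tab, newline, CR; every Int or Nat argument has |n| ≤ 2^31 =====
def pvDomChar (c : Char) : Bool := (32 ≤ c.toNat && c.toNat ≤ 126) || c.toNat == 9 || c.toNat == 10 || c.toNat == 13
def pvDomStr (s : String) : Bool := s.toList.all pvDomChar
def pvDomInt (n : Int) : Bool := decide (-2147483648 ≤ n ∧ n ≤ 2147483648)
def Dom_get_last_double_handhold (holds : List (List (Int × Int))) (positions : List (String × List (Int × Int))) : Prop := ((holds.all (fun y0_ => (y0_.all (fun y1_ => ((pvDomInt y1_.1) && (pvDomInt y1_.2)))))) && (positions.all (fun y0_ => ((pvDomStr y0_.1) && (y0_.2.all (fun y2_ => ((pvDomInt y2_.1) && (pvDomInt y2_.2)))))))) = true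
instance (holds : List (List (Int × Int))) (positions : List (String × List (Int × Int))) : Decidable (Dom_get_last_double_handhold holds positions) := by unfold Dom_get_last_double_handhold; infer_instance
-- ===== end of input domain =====

-- B replaces A's forward accumulator-overwriting double scan by a backward scan with early
-- return (frames from the last, hold indices from the top); same return value on Pre_.

-- ===== PORT A =====
-- exact on Pre_ (every hold has ≥ 2 corners when a frame exists); Python raises IndexError
-- on a shorter hold, and those inputs are excluded by Pre_get_last_double_handhold.
def joint_in_hold (joint : Int × Int) (hold : List (Int × Int)) : Bool :=
  match PySem.List.pyGet? hold 0, PySem.List.pyGet? hold 1 with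
  | some (hxmin, hymin), some (hxmax, hymax) =>
      if joint.1 ≤ hxmax ∧ joint.1 ≥ hxmin ∧ joint.2 ≤ hymax ∧ joint.2 ≥ hymin then true else false
  | _, _ => false

-- positions['left_hand'] is a first-match association-list lookup; KeyError excluded by Pre_.
def get_last_double_handhold (holds : List (List (Int × Int))) (positions : List (String × List (Int × Int))) : Int :=
  let lh := ((positions.find? (fun kv => kv.1 == "left_hand")).map (·.2)).getD []
  let rh := ((positions.find? (fun kv => kv.1 == "right_hand")).map (·.2)).getD []
  let zipped := lh.zip rh
  zipped.foldl (fun last_idx p =>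
    (PySem.List.enumerate holds).foldl (fun acc jh =>
      if joint_in_hold p.1 jh.2 && joint_in_hold p.2 jh.2 then jh.1 else acc) last_idx) (-1)

-- ===== PORT B =====
def joint_in_hold_alt (joint : Int × Int) (hold : List (Int × Int)) : Bool :=
  match hold with
  | (hxmin, hymin) :: (hxmax, hymax) :: _ =>
      joint.1 ≤ hxmax && hxmin ≤ joint.1 && joint.2 ≤ hymax && hymin ≤ joint.2
  | _ => false

-- _scan_frame: largest hold index containing both hands, or none
def scan_frame_alt (holds : List (List (Int × Int))) (lh rh : Int × Int) : Option Int :=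
  ((PySem.List.enumerate holds).reverse.find?
    (fun jh => joint_in_hold_alt lh jh.2 && joint_in_hold_alt rh jh.2)).map (·.1)

def get_last_double_handhold_alt (holds : List (List (Int × Int))) (positions : List (String × List (Int × Int))) : Int :=
  let lh := ((positions.find? (fun kv => kv.1 == "left_hand")).map (·.2)).getD []
  let rh := ((positions.find? (fun kv => kv.1 == "right_hand")).map (·.2)).getD []
  match (lh.zip rh).reverse.findSome? (fun p => scan_frame_alt holds p.1 p.2) with
  | some j => j
  | none => -1

-- ===== PRECONDITION & SPEC =====
-- Pre_ excludes exactly the inputs where the Python A raises: a missing 'left_hand'/'right_hand'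
-- key (KeyError) and, when at least one frame exists, a hold with fewer than 2 corner points
-- (IndexError in joint_in_hold).
def Pre_get_last_double_handhold (holds : List (List (Int × Int))) (positions : List (String × List (Int × Int))) : Prop :=
  (positions.find? (fun kv => kv.1 == "left_hand")).isSome ∧
  (positions.find? (fun kv => kv.1 == "right_hand")).isSome ∧
  (((positions.find? (fun kv => kv.1 == "left_hand")).map (·.2)).getD [] = [] ∨
   ((positions.find? (fun kv => kv.1 == "right_hand")).map (·.2)).getD [] = [] ∨
   ∀ h ∈ holds, 2 ≤ h.length)
instance (holds : List (List (Int × Int))) (positions : List (String × List (Int × Int))) : Decidable (Pre_get_last_double_handhold holds positions) := by unfold Pre_get_last_double_handhold; infer_instance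

def pvWitness_get_last_double_handhold : (List (List (Int × Int))) × (List (String × List (Int × Int))) :=
  ([[(0, 0), (2, 2)]], [("left_hand", [(1, 1)]), ("right_hand", [(1, 1)])])

def Spec_get_last_double_handhold (holds : List (List (Int × Int))) (positions : List (String × List (Int × Int))) (out : Int) : Prop := out = get_last_double_handhold_alt holds positions
instance (holds : List (List (Int × Int))) (positions : List (String × List (Int × Int))) (out : Int) : Decidable (Spec_get_last_double_handhold holds positions out) := by unfold Spec_get_last_double_handhold; infer_instance

-- ===== CLAIM (what is proved, stated in full; the proofs are below) =====
def Claim_equal_get_last_double_handhold : Prop := ∀ (holds : List (List (Int × Int))) (positions : List (String × List (Int × Int))), Dom_get_last_double_handhold holds positions → Pre_get_last_double_handhold holds positions → Spec_get_last_double_handhold holds positions (get_last_double_handhold holds positions)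

-- ===== LEMMAS AND PROOFS =====

-- the two joint_in_hold helpers agree
theorem jih_eq (j : Int × Int) (h : List (Int × Int)) :
    joint_in_hold j h = joint_in_hold_alt j h := by
  rcases h with _ | ⟨⟨a, b⟩, _ | ⟨⟨c, d⟩, t⟩⟩
  · simp [joint_in_hold, joint_in_hold_alt, PySem.List.pyGet?, PySem.List.pyIdx?]
  · simp [joint_in_hold, joint_in_hold_alt, PySem.List.pyGet?, PySem.List.pyIdx?]
  · have h1 : PySem.List.pyGet? ((a, b) :: (c, d) :: t) 1 = some (c, d) := by
      rw [show (1 : Int) = ((1 : Nat) : Int) by norm_num, PySem.List.pyGet?_natCast]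
      rfl
    simp only [joint_in_hold, joint_in_hold_alt, PySem.List.pyGet?_zero_cons, h1]
    by_cases hc1 : j.1 ≤ c <;> by_cases hc2 : a ≤ j.1 <;> by_cases hc3 : j.2 ≤ d <;>
      by_cases hc4 : b ≤ j.2 <;> simp [hc1, hc2, hc3, hc4]

-- a fold that overwrites the accumulator on a predicate keeps the LAST hit:
-- it equals a find? on the reversed list
theorem foldl_if_last {α β : Type} (P : α → Bool) (v : α → β) :
    ∀ (l : List α) (acc : β),
      l.foldl (fun a x => if P x then v x else a) acc
        = ((l.reverse.find? P).map v).getD acc := by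
  intro l
  induction l with
  | nil => intro acc; rfl
  | cons x l ih =>
    intro acc
    simp only [List.foldl_cons, ih, List.reverse_cons, List.find?_append]
    cases hf : l.reverse.find? P with
    | some y => simp [Option.or]
    | none => cases hP : P x <;> simp [Option.or, List.find?, hP]

-- a fold that replaces the accumulator whenever an option is some keeps the LAST some:
-- it equals a findSome? on the reversed list
theorem foldl_getD_last {α β : Type} (g : α → Option β) :
    ∀ (l : List α) (acc : β),
      l.foldl (fun a x => (g x).getD a) acc = (l.reverse.findSome? g).getD acc := by
  intro l
  induction l with
  | nil => intro acc; rfl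
  | cons x l ih =>
    intro acc
    simp only [List.foldl_cons, ih, List.reverse_cons, List.findSome?_append]
    cases hf : l.reverse.findSome? g with
    | some y => simp [Option.or]
    | none => cases hg : g x <;> simp [Option.or, List.findSome?, hg]

-- ===== VERDICT (by name: the statement is the Claim_ definition above) =====
theorem get_last_double_handhold_spec : Claim_equal_get_last_double_handhold := by
  intro holds positions _ _
  unfold Spec_get_last_double_handhold get_last_double_handhold get_last_double_handhold_alt
  simp only []
  set lh := ((positions.find? (fun kv => kv.1 == "left_hand")).map (·.2)).getD [] with hlh
  set rh := ((positions.find? (fun kv => kv.1 == "right_hand")).map (·.2)).getD [] with hrh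
  have hinner : ∀ (p : (Int × Int) × (Int × Int)) (acc : Int),
      (PySem.List.enumerate holds).foldl (fun acc jh =>
        if joint_in_hold p.1 jh.2 && joint_in_hold p.2 jh.2 then jh.1 else acc) acc
        = (scan_frame_alt holds p.1 p.2).getD acc := by
    intro p acc
    have hl := foldl_if_last
      (fun jh : Int × List (Int × Int) => joint_in_hold p.1 jh.2 && joint_in_hold p.2 jh.2)
      (fun jh : Int × List (Int × Int) => jh.1) (PySem.List.enumerate holds) acc
    rw [hl]
    simp [scan_frame_alt, jih_eq]
  calc (lh.zip rh).foldl (fun last_idx p =>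
          (PySem.List.enumerate holds).foldl (fun acc jh =>
            if joint_in_hold p.1 jh.2 && joint_in_hold p.2 jh.2 then jh.1 else acc) last_idx) (-1)
      = (lh.zip rh).foldl (fun last_idx p => (scan_frame_alt holds p.1 p.2).getD last_idx) (-1) := by
        simp only [hinner]
    _ = ((lh.zip rh).reverse.findSome? (fun p => scan_frame_alt holds p.1 p.2)).getD (-1) := by
        rw [foldl_getD_last]
    _ = _ := by
        cases hf : (lh.zip rh).reverse.findSome? (fun p => scan_frame_alt holds p.1 p.2) <;> rfl
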